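-- pv_equiv track=rewrite | github.com/notoraptor/pysaurus | tests/mocks/mock_database.py | _video_matches_source
-- ===== SOURCE A (Python) =====
-- def _video_matches_source(video: dict, source_path: list[str]) -> bool:
--     for part in source_path:
--         if part == "readable" and video.get("unreadable", False):
--             return False
--         if part == "unreadable" and not video.get("unreadable", False):
--             return False
--         if part == "found" and not video.get("found", True):
--             return False
--         if part == "not_found" and video.get("found", True):
--             return False
--     return True
-- ===== SOURCE B (Python) =====
-- def _video_matches_source(video: dict, source_path: list[str]) -> bool:
--     # Invert the check: derive from the video's state the two filter tokens it
--     # conflicts with, then test whether source_path mentions either of them.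
--     bad_read = "readable" if video.get("unreadable", False) else "unreadable"
--     bad_found = "not_found" if video.get("found", True) else "found"
--     return bad_read not in source_path and bad_found not in source_path
-- ===== Notes on version B (the rewrite author's own statement) =====
-- stated objective: simpler
-- what changed: Inverts the iteration: instead of scanning source_path and running a four-way if-cascade per element, B computes from the video state the two forbidden filter tokens and returns whether source_path is free of both (two membership tests).
import Mathlib
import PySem

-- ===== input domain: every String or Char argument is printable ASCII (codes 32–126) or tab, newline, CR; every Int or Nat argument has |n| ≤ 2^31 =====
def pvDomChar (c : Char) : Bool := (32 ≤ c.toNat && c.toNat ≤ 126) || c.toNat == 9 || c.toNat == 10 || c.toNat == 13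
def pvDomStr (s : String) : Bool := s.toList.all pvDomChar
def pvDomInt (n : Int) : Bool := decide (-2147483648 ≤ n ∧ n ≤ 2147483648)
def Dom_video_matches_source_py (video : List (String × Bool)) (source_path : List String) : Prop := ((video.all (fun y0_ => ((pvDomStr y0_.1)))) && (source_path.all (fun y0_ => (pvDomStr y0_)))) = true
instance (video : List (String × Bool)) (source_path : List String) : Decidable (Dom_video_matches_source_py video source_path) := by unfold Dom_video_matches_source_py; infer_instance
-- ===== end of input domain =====

-- B inverts the iteration: it derives the two forbidden filter tokens from the video state and checks source_path contains neither, instead of A's per-element four-way if cascade (objective: simpler).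


-- ===== PORT A =====
-- Port of A: per-element four-way if cascade with early return, as structural recursion.
def video_matches_source_py (video : List (String × Bool)) (source_path : List String) : Bool :=
  match source_path with
  | [] => true
  | part :: rest =>
      if part == "readable" && PySem.Dict.getD ⟨video⟩ "unreadable" false then false
      else if part == "unreadable" && !(PySem.Dict.getD ⟨video⟩ "unreadable" false) then false
      else if part == "found" && !(PySem.Dict.getD ⟨video⟩ "found" true) then false
      else if part == "not_found" && PySem.Dict.getD ⟨video⟩ "found" true then false
      else video_matches_source_py video rest

-- ===== PORT B =====
-- Port of B: compute the two forbidden tokens from the video state, then two membership tests.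
def video_matches_source_py_alt (video : List (String × Bool)) (source_path : List String) : Bool :=
  let badRead := if PySem.Dict.getD ⟨video⟩ "unreadable" false then "readable" else "unreadable"
  let badFound := if PySem.Dict.getD ⟨video⟩ "found" true then "not_found" else "found"
  !(source_path.contains badRead) && !(source_path.contains badFound)

-- ===== PRECONDITION & SPEC =====
def Spec_video_matches_source_py (video : List (String × Bool)) (source_path : List String) (out : Bool) : Prop := out = video_matches_source_py_alt video source_path
instance (video : List (String × Bool)) (source_path : List String) (out : Bool) : Decidable (Spec_video_matches_source_py video source_path out) := by unfold Spec_video_matches_source_py; infer_instance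

-- ===== CLAIM (what is proved, stated in full; the proofs are below) =====
def Claim_equal_video_matches_source_py : Prop := ∀ (video : List (String × Bool)) (source_path : List String), Dom_video_matches_source_py video source_path → Spec_video_matches_source_py video source_path (video_matches_source_py video source_path)

-- ===== LEMMAS AND PROOFS =====

-- ===== VERDICT (by name: the statement is the Claim_ definition above) =====
-- A's four-way cascade on one element, written as a boolean conjunction
theorem A_cons (video : List (String × Bool)) (part : String) (rest : List String) :
    video_matches_source_py video (part :: rest) =
      ((!(part == "readable" && PySem.Dict.getD ⟨video⟩ "unreadable" false) &&
        !(part == "unreadable" && !(PySem.Dict.getD ⟨video⟩ "unreadable" false)) &&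
        !(part == "found" && !(PySem.Dict.getD ⟨video⟩ "found" true)) &&
        !(part == "not_found" && PySem.Dict.getD ⟨video⟩ "found" true)) &&
       video_matches_source_py video rest) := by
  rw [video_matches_source_py]
  split_ifs with c1 c2 c3 c4 <;> (simp_all; try tauto)

-- one element passes A's cascade iff it is neither of B's forbidden tokens
theorem elem_ok (video : List (String × Bool)) (part : String) :
    (!((if PySem.Dict.getD ⟨video⟩ "unreadable" false then "readable" else "unreadable") == part) &&
     !((if PySem.Dict.getD ⟨video⟩ "found" true then "not_found" else "found") == part)) =
    (!(part == "readable" && PySem.Dict.getD ⟨video⟩ "unreadable" false) &&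
     !(part == "unreadable" && !(PySem.Dict.getD ⟨video⟩ "unreadable" false)) &&
     !(part == "found" && !(PySem.Dict.getD ⟨video⟩ "found" true)) &&
     !(part == "not_found" && PySem.Dict.getD ⟨video⟩ "found" true)) := by
  cases hu : PySem.Dict.getD (⟨video⟩ : PySem.Dict String Bool) "unreadable" false <;>
  cases hf : PySem.Dict.getD (⟨video⟩ : PySem.Dict String Bool) "found" true <;>
    by_cases h1 : part = "readable" <;>
    by_cases h2 : part = "unreadable" <;>
    by_cases h3 : part = "found" <;>
    by_cases h4 : part = "not_found" <;>
    simp_all [BEq.comm]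

-- boolean rearrangement used in the induction step
theorem bool_shuffle (a b c d : Bool) :
    ((!a && !b) && (!c && !d)) = (!(a || c) && !(b || d)) := by
  cases a <;> cases b <;> cases c <;> cases d <;> rfl

theorem A_eq_alt (video : List (String × Bool)) :
    ∀ sp : List String, video_matches_source_py video sp = video_matches_source_py_alt video sp := by
  intro sp
  induction sp with
  | nil => simp [video_matches_source_py, video_matches_source_py_alt]
  | cons part rest ih =>
    rw [A_cons, ih, ← elem_ok]
    simp only [video_matches_source_py_alt, List.contains_cons]
    exact bool_shuffle _ _ _ _

-- ===== VERDICT (by name: the statement is the Claim_ definition above) =====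
theorem video_matches_source_py_spec : Claim_equal_video_matches_source_py := by
  intro video source_path _
  exact A_eq_alt video source_path
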